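-- pv_equiv track=rewrite | github.com/cyprienhm/project-euler | problem-0007/s.py | segmented_sieves
-- ===== SOURCE A (Python) =====
-- import math
--
-- def segmented_sieves(num_sieves):
--     yielded = 0
--     delta = int(math.sqrt(num_sieves)) + 2
--
--     first_sieve = {i: True for i in range(2, 2 + delta)}
--
--     for i, elt in first_sieve.items():
--         mul = i * i
--         while mul <= max(first_sieve.keys()):
--             first_sieve[mul] = False
--             mul += i
--
--     sieves = [first_sieve]
--     yield first_sieve
--
--     while yielded < num_sieves:
--         prev_higher = max(sieves[-1].keys()) + 1
--         new_sieve = {i: True for i in range(prev_higher, prev_higher + delta)}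
--
--         for prev_sieve in sieves:
--             for i, elt in prev_sieve.items():
--                 if elt:
--                     mul = i * i
--                     while mul <= prev_higher + delta:
--                         if mul in new_sieve:
--                             new_sieve[mul] = False
--                         mul += i
--         sieves.append(new_sieve)
--         yield new_sieve
--         yielded += 1
-- ===== SOURCE B (Python) =====
-- import math
--
--
-- def segmented_sieves(num_sieves):
--     # Incremental segmented sieve: keep a flat list of primes found so far and
--     # cross each new segment off once, jumping straight to the first multiple
--     # inside the segment instead of re-scanning every previous segment's dict.
--     delta = math.isqrt(num_sieves) + 2
--     lo = 2
--     hi = lo + delta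
--     limit = hi - 1
--     sieve = {m: True for m in range(lo, hi)}
--     for i in range(2, math.isqrt(limit) + 1):
--         for mul in range(i * i, limit + 1, i):
--             sieve[mul] = False
--     primes = [p for p, is_p in sieve.items() if is_p]
--     yield sieve
--     for _ in range(num_sieves):
--         lo += delta
--         hi = lo + delta
--         sieve = {m: True for m in range(lo, hi)}
--         for p in primes:
--             if p * p >= hi:
--                 break
--             start = max(p * p, ((lo + p - 1) // p) * p)
--             for mul in range(start, hi, p):
--                 sieve[mul] = False
--         primes.extend(q for q, is_q in sieve.items() if is_q)
--         yield sieve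
-- ===== Notes on version B (the rewrite author's own statement) =====
-- stated objective: faster
-- what changed: B keeps one flat ascending list of the primes found so far and crosses each new segment off once (breaking at p*p >= hi and jumping directly to the first multiple inside the segment, with segment bounds computed arithmetically), instead of re-scanning every entry of every previous segment's dict, walking multiples up from p*p each time, and recomputing max(keys) inside the first sieve's inner while loop.
import Mathlib
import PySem

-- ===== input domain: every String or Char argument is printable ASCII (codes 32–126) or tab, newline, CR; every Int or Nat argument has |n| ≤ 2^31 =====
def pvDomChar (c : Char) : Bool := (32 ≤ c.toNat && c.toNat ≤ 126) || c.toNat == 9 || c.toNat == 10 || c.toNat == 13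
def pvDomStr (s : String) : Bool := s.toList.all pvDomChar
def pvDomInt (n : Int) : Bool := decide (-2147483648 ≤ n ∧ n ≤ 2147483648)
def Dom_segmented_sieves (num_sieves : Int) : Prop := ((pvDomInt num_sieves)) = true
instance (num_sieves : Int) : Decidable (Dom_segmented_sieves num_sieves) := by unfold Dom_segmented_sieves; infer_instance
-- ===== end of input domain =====

-- B replaces A's per-segment re-scan of every previous sieve dict (walking multiples up from
-- p*p each time, and recomputing max(keys) in the first sieve's inner loop) by one flat list of
-- the primes found so far, crossed off each segment from its first in-segment multiple: faster.

-- ===== PORT A =====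
-- max(d.keys()); every dict here is nonempty, so the .getD 0 default is never used
def pvMaxKeys (d : PySem.Dict Int Bool) : Int :=
  (PySem.List.max? d.keys (fun x => x)).getD 0

-- 'while mul <= max(first_sieve.keys()): first_sieve[mul] = False; mul += i' (bound recomputed
-- each iteration, as in the Python); fuel bounds the iteration count, exact since i >= 1 there
def pvAMark1 : Nat → Int → Int → PySem.Dict Int Bool → PySem.Dict Int Bool
  | 0, _, _, d => d
  | fuel+1, i, mul, d =>
    if mul ≤ pvMaxKeys d then pvAMark1 fuel i (mul + i) (d.insert mul false) else d

-- 'while mul <= prev_higher + delta: if mul in new_sieve: new_sieve[mul] = False; mul += i'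
def pvAMark2 : Nat → Int → Int → Int → PySem.Dict Int Bool → PySem.Dict Int Bool
  | 0, _, _, _, d => d
  | fuel+1, i, mul, bound, d =>
    if mul ≤ bound then
      pvAMark2 fuel i (mul + i) bound (if d.contains mul then d.insert mul false else d)
    else d

-- first_sieve = {i: True for i in range(2, 2+delta)} then the marking loop over its items
-- (the loop ignores elt, so folding over a snapshot of the items is exact)
def pvAFirst (delta : Int) : PySem.Dict Int Bool :=
  let d0 := (PySem.List.pyRange 2 (2 + delta) 1).foldl (fun d i => d.insert i true) PySem.Dict.empty
  d0.items.foldl (fun d q => pvAMark1 ((pvMaxKeys d - q.1 * q.1).toNat + 1) q.1 (q.1 * q.1) d) d0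

-- one body of A's while loop: build new_sieve and cross it off from every previous sieve
def pvASeg (delta prev_higher : Int) (sieves : List (PySem.Dict Int Bool)) : PySem.Dict Int Bool :=
  sieves.foldl (fun nd ps =>
      ps.items.foldl (fun nd q =>
          if q.2 then
            pvAMark2 ((prev_higher + delta - q.1 * q.1).toNat + 1) q.1 (q.1 * q.1) (prev_higher + delta) nd
          else nd) nd)
    ((PySem.List.pyRange prev_higher (prev_higher + delta) 1).foldl (fun d i => d.insert i true) PySem.Dict.empty)

-- 'while yielded < num_sieves: ...'; fuel = num_sieves.toNat + 1 dominates the iteration count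
def pvALoop (delta : Int) : Nat → Int → Int → List (PySem.Dict Int Bool) → List (List (Int × Bool))
  | 0, _, _, _ => []
  | fuel+1, yielded, num_sieves, sieves =>
    if yielded < num_sieves then
      let prev_higher := pvMaxKeys ((PySem.List.pyGet? sieves (-1)).getD PySem.Dict.empty) + 1
      let ns := pvASeg delta prev_higher sieves
      ns.items :: pvALoop delta fuel (yielded + 1) num_sieves (sieves ++ [ns])
    else []

-- int(math.sqrt(num_sieves)) = Nat.sqrt on the admitted domain (0 ≤ n ≤ 2^31)
def segmented_sieves (num_sieves : Int) : List (List (Int × Bool)) :=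
  let delta : Int := (Nat.sqrt num_sieves.toNat : Int) + 2
  let fs := pvAFirst delta
  fs.items :: pvALoop delta (num_sieves.toNat + 1) 0 num_sieves [fs]

-- ===== PORT B =====
-- [p for p, is_p in sieve.items() if is_p]
def pvTrueKeys (d : PySem.Dict Int Bool) : List Int := (d.items.filter (·.2)).map (·.1)

-- start = max(p*p, ((lo + p - 1) // p) * p); for mul in range(start, hi, p): sieve[mul] = False
def pvBCross (lo hi : Int) (d : PySem.Dict Int Bool) (p : Int) : PySem.Dict Int Bool :=
  (PySem.List.pyRange (max (p * p) (PySem.Int.floordiv (lo + p - 1) p * p)) hi p).foldl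
    (fun d mul => d.insert mul false) d

-- 'for p in primes: if p * p >= hi: break; ...' — the break is the takeWhile cut
def pvBSeg (lo hi : Int) (primes : List Int) : PySem.Dict Int Bool :=
  (primes.takeWhile (fun p => decide (p * p < hi))).foldl (pvBCross lo hi)
    ((PySem.List.pyRange lo hi 1).foldl (fun d m => d.insert m true) PySem.Dict.empty)

-- sieve = {m: True for m in range(2, hi)}; for i in range(2, isqrt(limit)+1): cross range(i*i, limit+1, i)
def pvBFirst (delta : Int) : PySem.Dict Int Bool :=
  let limit : Int := delta + 1
  (PySem.List.pyRange 2 ((Nat.sqrt limit.toNat : Int) + 1) 1).foldl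
    (fun d i => (PySem.List.pyRange (i * i) (limit + 1) i).foldl (fun d mul => d.insert mul false) d)
    ((PySem.List.pyRange 2 (2 + delta) 1).foldl (fun d m => d.insert m true) PySem.Dict.empty)

-- for _ in range(num_sieves): lo += delta; cross segment with the primes found so far
def pvBLoop (delta : Int) : Nat → Int → List Int → List (List (Int × Bool))
  | 0, _, _ => []
  | n+1, lo, primes =>
    let lo' := lo + delta
    let s := pvBSeg lo' (lo' + delta) primes
    s.items :: pvBLoop delta n lo' (primes ++ pvTrueKeys s)

def segmented_sieves_alt (num_sieves : Int) : List (List (Int × Bool)) :=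
  let delta : Int := (Nat.sqrt num_sieves.toNat : Int) + 2
  let s1 := pvBFirst delta
  s1.items :: pvBLoop delta num_sieves.toNat 2 (pvTrueKeys s1)

-- ===== PRECONDITION & SPEC =====
-- Pre_ excludes exactly the negative inputs, on which Python A raises ValueError (math.sqrt of a negative).
def Pre_segmented_sieves (num_sieves : Int) : Prop := 0 ≤ num_sieves
instance (num_sieves : Int) : Decidable (Pre_segmented_sieves num_sieves) := by
  unfold Pre_segmented_sieves; infer_instance

def pvWitness_segmented_sieves : Int := (3)

def Spec_segmented_sieves (num_sieves : Int) (out : List (List (Int × Bool))) : Prop :=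
  out = segmented_sieves_alt num_sieves
instance (num_sieves : Int) (out : List (List (Int × Bool))) : Decidable (Spec_segmented_sieves num_sieves out) := by
  unfold Spec_segmented_sieves; infer_instance

-- ===== CLAIM (what is proved, stated in full; the proofs are below) =====
def Claim_equal_segmented_sieves : Prop := ∀ (num_sieves : Int), Dom_segmented_sieves num_sieves → Pre_segmented_sieves num_sieves → Spec_segmented_sieves num_sieves (segmented_sieves num_sieves)

-- ===== LEMMAS AND PROOFS =====

-- canonical form of a segment dict's items
def segItems (lo hi : Int) (f : Int → Bool) : List (Int × Bool) :=
  (PySem.List.pyRange lo hi 1).map (fun k => (k, f k))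

theorem segItems_congr {lo hi : Int} {f g : Int → Bool}
    (h : ∀ k, lo ≤ k → k < hi → f k = g k) : segItems lo hi f = segItems lo hi g := by
  unfold segItems
  exact List.map_congr_left (fun k hk => by
    rw [PySem.List.mem_pyRange_one] at hk; rw [h k hk.1 hk.2])

theorem keys_seg {lo hi : Int} {f : Int → Bool} {d : PySem.Dict Int Bool}
    (hd : d.items = segItems lo hi f) : d.keys = PySem.List.pyRange lo hi 1 := by
  show d.items.map (·.1) = _
  rw [hd]; unfold segItems; rw [List.map_map]
  simp [Function.comp_def]

theorem max?_pyRange {a b : Int} (h : a < b) :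
    PySem.List.max? (PySem.List.pyRange a b 1) (fun x => x) = some (b - 1) := by
  have hmem : b - 1 ∈ PySem.List.pyRange a b 1 := by
    rw [PySem.List.mem_pyRange_one]; omega
  cases heq : PySem.List.max? (PySem.List.pyRange a b 1) (fun x => x) with
  | none =>
    rw [PySem.List.max?_eq_none_iff] at heq
    rw [heq] at hmem; simp at hmem
  | some m =>
    have h1 := PySem.List.max?_mem heq
    have h2 := PySem.List.max?_isMax heq (b - 1) hmem
    rw [PySem.List.mem_pyRange_one] at h1
    have : m = b - 1 := by omega
    rw [this]

theorem maxKeys_seg {lo hi : Int} {f : Int → Bool} {d : PySem.Dict Int Bool}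
    (hd : d.items = segItems lo hi f) (h : lo < hi) : pvMaxKeys d = hi - 1 := by
  unfold pvMaxKeys
  rw [keys_seg hd, max?_pyRange h]
  rfl

theorem contains_seg {lo hi : Int} {f : Int → Bool} {d : PySem.Dict Int Bool}
    (hd : d.items = segItems lo hi f) (m : Int) :
    d.contains m = decide (lo ≤ m ∧ m < hi) := by
  by_cases hm : lo ≤ m ∧ m < hi
  · have hk : m ∈ d.keys := by rw [keys_seg hd, PySem.List.mem_pyRange_one]; exact hm
    rw [(PySem.Dict.contains_iff_mem_keys d m).2 hk]
    simp [hm]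
  · have hne : d.contains m ≠ true := fun hc => by
      have := (PySem.Dict.contains_iff_mem_keys d m).1 hc
      rw [keys_seg hd, PySem.List.mem_pyRange_one] at this
      exact hm this
    simp only [Bool.not_eq_true] at hne
    rw [hne]
    simp [hm]

theorem items_insert_false {lo hi : Int} {f : Int → Bool} {d : PySem.Dict Int Bool}
    (hd : d.items = segItems lo hi f) {m : Int} (hm : lo ≤ m ∧ m < hi) :
    (d.insert m false).items = segItems lo hi (fun k => f k && !(k == m)) := by
  have hc : d.contains m = true := by rw [contains_seg hd]; simp [hm]
  rw [PySem.Dict.items_insert_of_contains d false hc, hd]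
  unfold segItems
  rw [List.map_map]
  refine List.map_congr_left (fun k hk => ?_)
  by_cases hkm : k = m
  · subst hkm; simp
  · simp [hkm, Prod.ext_iff]

theorem items_ginsert_false {lo hi : Int} {f : Int → Bool} {d : PySem.Dict Int Bool}
    (hd : d.items = segItems lo hi f) (m : Int) :
    (if d.contains m then d.insert m false else d).items
      = segItems lo hi (fun k => f k && !(k == m)) := by
  rw [contains_seg hd]
  by_cases hm : lo ≤ m ∧ m < hi
  · simp only [hm, and_self, decide_true, if_true]
    exact items_insert_false hd hm
  · simp only [decide_eq_true_eq, hm, if_false]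
    rw [hd]
    refine segItems_congr (fun k hk1 hk2 => ?_)
    have : k ≠ m := by rintro rfl; exact hm ⟨hk1, hk2⟩
    simp [this]

-- peeling one multiple off the arithmetic progression {mul, mul+i, ...} ∩ [·, bound]
theorem step_dvd_iff {i mul bound k : Int} (hi1 : 1 ≤ i) (hc : mul ≤ bound) :
    (mul ≤ k ∧ k ≤ bound ∧ i ∣ (k - mul)) ↔
      (k = mul ∨ (mul + i ≤ k ∧ k ≤ bound ∧ i ∣ (k - (mul + i)))) := by
  constructor
  · rintro ⟨h1, h2, t, ht⟩
    by_cases hk : k = mul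
    · exact Or.inl hk
    · have ht0 : 1 ≤ t := by
        by_contra hcon
        rw [not_le] at hcon
        have := mul_nonpos_of_nonneg_of_nonpos (by omega : (0:Int) ≤ i) (by omega : t ≤ 0)
        omega
      refine Or.inr ⟨?_, h2, ⟨t - 1, by linear_combination ht⟩⟩
      have := le_mul_of_one_le_right (by omega : (0:Int) ≤ i) ht0
      omega
  · rintro (rfl | ⟨h1, h2, t, ht⟩)
    · exact ⟨le_refl _, hc, 0, by ring⟩
    · exact ⟨by omega, h2, t + 1, by linear_combination ht⟩

theorem mark2_char {lo hi : Int} (i bound : Int) (hi1 : 1 ≤ i) :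
    ∀ (fuel : Nat) (mul : Int) (f : Int → Bool) (d : PySem.Dict Int Bool),
      (bound - mul + 1).toNat ≤ fuel →
      d.items = segItems lo hi f →
      (pvAMark2 fuel i mul bound d).items
        = segItems lo hi (fun k => f k && !decide (mul ≤ k ∧ k ≤ bound ∧ i ∣ (k - mul))) := by
  intro fuel
  induction fuel with
  | zero =>
    intro mul f d hf hd
    have hc : ¬ mul ≤ bound := by omega
    rw [pvAMark2, hd]
    refine segItems_congr (fun k _ _ => ?_)
    have hnp : ¬ (mul ≤ k ∧ k ≤ bound ∧ i ∣ (k - mul)) := by rintro ⟨h1, h2, -⟩; omega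
    rw [decide_eq_false hnp]; simp
  | succ n ih =>
    intro mul f d hf hd
    by_cases hc : mul ≤ bound
    · rw [pvAMark2, if_pos hc]
      have hd' := items_ginsert_false hd mul
      have ihr := ih (mul + i) (fun k => f k && !(k == mul)) _ (by omega) hd'
      rw [ihr]
      refine segItems_congr (fun k _ _ => ?_)
      have hiff := step_dvd_iff (k := k) hi1 hc
      by_cases hk : k = mul
      · subst hk; simp [hc]
      · have heq : (mul ≤ k ∧ k ≤ bound ∧ i ∣ (k - mul))
            ↔ (mul + i ≤ k ∧ k ≤ bound ∧ i ∣ (k - (mul + i))) := by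
          rw [hiff]; simp [hk]
        rw [decide_eq_decide.mpr heq]
        have hbe : (k == mul) = false := beq_eq_false_iff_ne.mpr hk
        simp [hbe]
        infer_instance
    · rw [pvAMark2, if_neg hc, hd]
      refine segItems_congr (fun k _ _ => ?_)
      have hnp : ¬ (mul ≤ k ∧ k ≤ bound ∧ i ∣ (k - mul)) := by rintro ⟨h1, h2, -⟩; omega
      rw [decide_eq_false hnp]; simp

theorem mark1_char {lo hi : Int} (i : Int) (hi1 : 1 ≤ i) (hlh : lo < hi) :
    ∀ (fuel : Nat) (mul : Int) (f : Int → Bool) (d : PySem.Dict Int Bool),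
      (hi - 1 - mul + 1).toNat ≤ fuel →
      lo ≤ mul →
      d.items = segItems lo hi f →
      (pvAMark1 fuel i mul d).items
        = segItems lo hi (fun k => f k && !decide (mul ≤ k ∧ k ≤ hi - 1 ∧ i ∣ (k - mul))) := by
  intro fuel
  induction fuel with
  | zero =>
    intro mul f d hf _ hd
    have hc : ¬ mul ≤ hi - 1 := by omega
    rw [pvAMark1, hd]
    refine segItems_congr (fun k _ _ => ?_)
    have hnp : ¬ (mul ≤ k ∧ k ≤ hi - 1 ∧ i ∣ (k - mul)) := by rintro ⟨h1, h2, -⟩; omega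
    rw [decide_eq_false hnp]; simp
  | succ n ih =>
    intro mul f d hf hlom hd
    rw [pvAMark1, maxKeys_seg hd hlh]
    by_cases hc : mul ≤ hi - 1
    · rw [if_pos hc]
      have hd' := items_insert_false hd (m := mul) ⟨hlom, by omega⟩
      have ihr := ih (mul + i) (fun k => f k && !(k == mul)) _ (by omega) (by omega) hd'
      rw [ihr]
      refine segItems_congr (fun k _ _ => ?_)
      have hiff := step_dvd_iff (k := k) (bound := hi - 1) hi1 hc
      by_cases hk : k = mul
      · subst hk; simp [hc]
      · have heq : (mul ≤ k ∧ k ≤ hi - 1 ∧ i ∣ (k - mul))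
            ↔ (mul + i ≤ k ∧ k ≤ hi - 1 ∧ i ∣ (k - (mul + i))) := by
          rw [hiff]; simp [hk]
        rw [decide_eq_decide.mpr heq]
        have hbe : (k == mul) = false := beq_eq_false_iff_ne.mpr hk
        simp [hbe]
        infer_instance
    · rw [if_neg hc, hd]
      refine segItems_congr (fun k _ _ => ?_)
      have hnp : ¬ (mul ≤ k ∧ k ≤ hi - 1 ∧ i ∣ (k - mul)) := by rintro ⟨h1, h2, -⟩; omega
      rw [decide_eq_false hnp]; simp

theorem foldl_insert_false_items {lo hi : Int} :
    ∀ (L : List Int) (f : Int → Bool) (d : PySem.Dict Int Bool),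
      (∀ m ∈ L, lo ≤ m ∧ m < hi) →
      d.items = segItems lo hi f →
      ((L.foldl (fun d m => d.insert m false) d)).items
        = segItems lo hi (fun k => f k && !(L.contains k)) := by
  intro L
  induction L with
  | nil => intro f d _ hd; simpa using hd
  | cons m L ih =>
    intro f d hL hd
    have hd' := items_insert_false hd (hL m (by simp))
    rw [List.foldl_cons, ih _ _ (fun x hx => hL x (by simp [hx])) hd']
    refine segItems_congr (fun k _ _ => ?_)
    by_cases hk : k = m
    · subst hk; simp
    · have hbe : (k == m) = false := beq_eq_false_iff_ne.mpr hk
      simp [hbe, hk]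

-- generic accumulation: a fold of steps that each conjoin !(h a ·) onto the value map
theorem foldl_seg_char {α : Type} {lo hi : Int}
    (step : PySem.Dict Int Bool → α → PySem.Dict Int Bool) (h : α → Int → Bool) :
    ∀ (P : List α) (f : Int → Bool) (d : PySem.Dict Int Bool),
      (∀ a ∈ P, ∀ (g : Int → Bool) (d' : PySem.Dict Int Bool),
        d'.items = segItems lo hi g →
        (step d' a).items = segItems lo hi (fun k => g k && !(h a k))) →
      d.items = segItems lo hi f →
      (P.foldl step d).items = segItems lo hi (fun k => f k && !(P.any (fun a => h a k))) := by
  intro P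
  induction P with
  | nil => intro f d _ hd; simpa using hd
  | cons a P ih =>
    intro f d hstep hd
    have hd' := hstep a (by simp) f d hd
    rw [List.foldl_cons, ih _ _ (fun x hx => hstep x (by simp [hx])) hd']
    refine segItems_congr (fun k _ _ => ?_)
    simp [Bool.and_assoc]

theorem base_items (lo hi : Int) :
    ((PySem.List.pyRange lo hi 1).foldl (fun d m => d.insert m true) PySem.Dict.empty).items
      = segItems lo hi (fun _ => true) := by
  rw [PySem.Dict.items_foldl_insert_fresh (PySem.List.pyRange lo hi 1) (fun a => a) (fun _ => true)
    PySem.Dict.empty (fun a _ => by simp) (by simpa using PySem.List.nodup_pyRange_one lo hi)]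
  simp [segItems]
  rfl

-- crossing from p*p with step p, capped at b ≥ k, marks exactly the multiples of p that are ≥ p*p
theorem crossA_iff {p k b : Int} (hkb : k ≤ b) :
    (p * p ≤ k ∧ k ≤ b ∧ p ∣ (k - p * p)) ↔ (p ∣ k ∧ p * p ≤ k) := by
  constructor
  · rintro ⟨h1, _, t, ht⟩
    exact ⟨⟨p + t, by linear_combination ht⟩, h1⟩
  · rintro ⟨⟨t, ht⟩, h1⟩
    exact ⟨h1, hkb, ⟨t - p, by linear_combination ht⟩⟩

-- the smallest multiple of p that is ≥ lo is ((lo+p-1)//p)*p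
theorem ceil_mult_le {p lo : Int} (hp0 : (0:Int) < p) :
    lo ≤ PySem.Int.floordiv (lo + p - 1) p * p := by
  have hbr := (PySem.Int.floordiv_eq_iff_of_pos hp0 (a := lo + p - 1)
    (q := PySem.Int.floordiv (lo + p - 1) p)).mp rfl
  have h2 := hbr.2
  have : (PySem.Int.floordiv (lo + p - 1) p + 1) * p
      = PySem.Int.floordiv (lo + p - 1) p * p + p := by ring
  rw [this] at h2
  omega

-- B's jump start max(p*p, ⌈lo/p⌉*p) reaches exactly the multiples of p in [lo, hi) that are ≥ p*p
theorem crossB_iff {p k lo hi : Int} (hp : 2 ≤ p) (hk1 : lo ≤ k) :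
    (k ∈ PySem.List.pyRange (max (p * p) (PySem.Int.floordiv (lo + p - 1) p * p)) hi p)
      ↔ (p ∣ k ∧ p * p ≤ k ∧ k < hi) := by
  have hp0 : (0:Int) < p := by omega
  have hbr := (PySem.Int.floordiv_eq_iff_of_pos hp0 (a := lo + p - 1)
    (q := PySem.Int.floordiv (lo + p - 1) p)).mp rfl
  set q := PySem.Int.floordiv (lo + p - 1) p with hqdef
  have hdvds : p ∣ max (p * p) (q * p) := by
    rcases max_choice (p * p) (q * p) with h | h <;> rw [h]
    · exact dvd_mul_right p p
    · exact Dvd.intro_left q rfl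
  rw [PySem.List.mem_pyRange_iff_of_pos hp0]
  constructor
  · rintro ⟨hsk, hkhi, hdk⟩
    have hpk : p ∣ k := by
      have := dvd_add hdk hdvds
      simpa using this
    exact ⟨hpk, le_trans (le_max_left _ _) hsk, hkhi⟩
  · rintro ⟨⟨t, ht⟩, hsq, hkhi⟩
    have hqt : q ≤ t := by
      by_contra hcon
      rw [not_le] at hcon
      have hmul : p * t ≤ p * (q - 1) := mul_le_mul_of_nonneg_left (by omega) (by omega)
      have hexp : p * (q - 1) = q * p - p := by ring
      have h2 := hbr.1
      omega
    have hqpk : q * p ≤ k := by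
      have : q * p ≤ t * p := mul_le_mul_of_nonneg_right hqt (by omega)
      have ht' : k = t * p := by linear_combination ht
      omega
    exact ⟨max_le hsq hqpk, hkhi, (dvd_sub_right ⟨t, ht⟩).mpr hdvds⟩

theorem mem_trueKeys {d : PySem.Dict Int Bool} {p : Int} (h : p ∈ pvTrueKeys d) :
    (p, true) ∈ d.items := by
  unfold pvTrueKeys at h
  rcases List.mem_map.mp h with ⟨⟨a, b⟩, hq, hq1⟩
  rcases List.mem_filter.mp hq with ⟨hqi, hq2⟩
  simp only at hq1 hq2
  subst hq1
  rw [hq2] at hqi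
  exact hqi

theorem trueKeys_of_items_eq {d d' : PySem.Dict Int Bool} (h : d.items = d'.items) :
    pvTrueKeys d = pvTrueKeys d' := by
  unfold pvTrueKeys; rw [h]

theorem trueKeys_bound {lo hi : Int} {f : Int → Bool} {d : PySem.Dict Int Bool}
    (hd : d.items = segItems lo hi f) : ∀ p ∈ pvTrueKeys d, lo ≤ p ∧ p < hi := by
  intro p hp
  have hmem := mem_trueKeys hp
  rw [hd] at hmem
  unfold segItems at hmem
  rcases List.mem_map.mp hmem with ⟨k, hk, hke⟩
  rw [PySem.List.mem_pyRange_one] at hk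
  have : k = p := congrArg Prod.fst hke
  omega

-- canonical items of A's per-iteration segment
theorem aseg_items (delta lo : Int)
    (sieves : List (PySem.Dict Int Bool))
    (hkeys : ∀ ps ∈ sieves, ∀ q ∈ ps.items, q.2 = true → 2 ≤ q.1) :
    (pvASeg delta lo sieves).items
      = segItems lo (lo + delta) (fun k =>
          !(sieves.any (fun ps => ps.items.any (fun q =>
              q.2 && decide (q.1 ∣ k ∧ q.1 * q.1 ≤ k))))) := by
  unfold pvASeg
  have hmain := foldl_seg_char (lo := lo) (hi := lo + delta)
    (fun nd ps =>
      ps.items.foldl (fun nd q =>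
          if q.2 then
            pvAMark2 ((lo + delta - q.1 * q.1).toNat + 1) q.1 (q.1 * q.1) (lo + delta) nd
          else nd) nd)
    (fun ps k => ps.items.any (fun q => q.2 && decide (q.1 ∣ k ∧ q.1 * q.1 ≤ k)))
    sieves (fun _ => true) _ ?_ (base_items lo (lo + delta))
  · rw [hmain]
    exact segItems_congr (fun k _ _ => by simp)
  · intro ps hps g d' hd'
    refine foldl_seg_char (lo := lo) (hi := lo + delta) _ _ ps.items g d' ?_ hd'
    intro q hq g' d'' hd''
    obtain ⟨q1, q2⟩ := q
    rcases Bool.eq_false_or_eq_true q2 with h2 | h2 <;> subst h2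
    · rw [if_pos rfl]
      simp only [Bool.true_and]
      have hq1 : 2 ≤ (q1, true).1 := hkeys ps hps (q1, true) hq rfl
      simp only at hq1
      have hm := mark2_char (lo := lo) (hi := lo + delta) q1 (lo + delta) (by omega)
        ((lo + delta - q1 * q1).toNat + 1) (q1 * q1) g' d'' (by omega) hd''
      rw [hm]
      refine segItems_congr (fun k _ hk2 => ?_)
      rw [decide_eq_decide.mpr (crossA_iff (by omega : k ≤ lo + delta))]
    · rw [if_neg (by simp)]
      rw [hd'']
      exact segItems_congr (fun k _ _ => by simp)

-- canonical items of B's per-iteration segment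
theorem bseg_items (lo hi : Int) (primes : List Int)
    (hp : ∀ p ∈ primes, 2 ≤ p) :
    (pvBSeg lo hi primes).items
      = segItems lo hi (fun k =>
          !((primes.takeWhile (fun p => decide (p * p < hi))).any
              (fun p => decide (p ∣ k ∧ p * p ≤ k)))) := by
  unfold pvBSeg
  have hpw : ∀ p ∈ primes.takeWhile (fun p => decide (p * p < hi)), 2 ≤ p :=
    fun p hpm => hp p ((List.takeWhile_sublist _).subset hpm)
  have hmain := foldl_seg_char (lo := lo) (hi := hi)
    (pvBCross lo hi)
    (fun p k => decide (p ∣ k ∧ p * p ≤ k))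
    (primes.takeWhile (fun p => decide (p * p < hi))) (fun _ => true) _ ?_ (base_items lo hi)
  · rw [hmain]
    exact segItems_congr (fun k _ _ => by simp)
  · intro p hpm g d' hd'
    have hp2 : 2 ≤ p := hpw p hpm
    have hp0 : (0:Int) < p := by omega
    unfold pvBCross
    have hmem : ∀ m ∈ PySem.List.pyRange (max (p * p) (PySem.Int.floordiv (lo + p - 1) p * p)) hi p,
        lo ≤ m ∧ m < hi := by
      intro m hm
      rw [PySem.List.mem_pyRange_iff_of_pos hp0] at hm
      have hlom : lo ≤ max (p * p) (PySem.Int.floordiv (lo + p - 1) p * p) :=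
        le_trans (ceil_mult_le hp0) (le_max_right _ _)
      exact ⟨le_trans hlom hm.1, hm.2.1⟩
    rw [foldl_insert_false_items _ g d' hmem hd']
    refine segItems_congr (fun k hk1 hk2 => ?_)
    have hcd : ((PySem.List.pyRange (max (p * p) (PySem.Int.floordiv (lo + p - 1) p * p)) hi p).contains k)
        = decide (k ∈ PySem.List.pyRange (max (p * p) (PySem.Int.floordiv (lo + p - 1) p * p)) hi p) := by
      simp [List.contains_eq_mem]
    rw [hcd, decide_eq_decide.mpr (crossB_iff hp2 hk1)]
    have : (p ∣ k ∧ p * p ≤ k ∧ k < hi) ↔ (p ∣ k ∧ p * p ≤ k) := by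
      constructor
      · rintro ⟨h1, h2, _⟩; exact ⟨h1, h2⟩
      · rintro ⟨h1, h2⟩; exact ⟨h1, h2, hk2⟩
    rw [decide_eq_decide.mpr this]
    infer_instance

-- canonical items of A's first sieve
theorem afirst_items (delta : Int) (hd2 : 2 ≤ delta) :
    (pvAFirst delta).items
      = segItems 2 (2 + delta) (fun k =>
          !((PySem.List.pyRange 2 (2 + delta) 1).any (fun i => decide (i ∣ k ∧ i * i ≤ k)))) := by
  unfold pvAFirst
  have h0 := base_items 2 (2 + delta)
  set d0 := (PySem.List.pyRange 2 (2 + delta) 1).foldl (fun d i => d.insert i true) PySem.Dict.empty with hd0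
  have hkq : ∀ q ∈ d0.items, 2 ≤ q.1 ∧ q.1 < 2 + delta := by
    intro q hq
    rw [h0] at hq
    unfold segItems at hq
    rcases List.mem_map.mp hq with ⟨k, hk, hke⟩
    rw [PySem.List.mem_pyRange_one] at hk
    have : k = q.1 := congrArg Prod.fst hke
    omega
  have hmain := foldl_seg_char (lo := 2) (hi := 2 + delta)
    (fun d q => pvAMark1 ((pvMaxKeys d - q.1 * q.1).toNat + 1) q.1 (q.1 * q.1) d)
    (fun (q : Int × Bool) k => decide (q.1 ∣ k ∧ q.1 * q.1 ≤ k))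
    d0.items (fun _ => true) d0 ?_ h0
  · rw [hmain]
    refine segItems_congr (fun k _ _ => ?_)
    rw [h0]
    unfold segItems
    rw [List.any_map]
    simp [Function.comp_def]
  · intro q hq g' d'' hd''
    have hq1 : 2 ≤ q.1 := (hkq q hq).1
    have hmk : pvMaxKeys d'' = 2 + delta - 1 := maxKeys_seg hd'' (by omega)
    dsimp only
    rw [hmk]
    have hm := mark1_char (lo := 2) (hi := 2 + delta) q.1 (by omega) (by omega)
      ((2 + delta - 1 - q.1 * q.1).toNat + 1) (q.1 * q.1) g' d'' (by omega) (by nlinarith) hd''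
    rw [hm]
    refine segItems_congr (fun k _ hk2 => ?_)
    rw [decide_eq_decide.mpr (crossA_iff (by omega : k ≤ 2 + delta - 1))]

-- canonical items of B's first sieve
theorem bfirst_items (delta : Int) (_hd2 : 2 ≤ delta) :
    (pvBFirst delta).items
      = segItems 2 (2 + delta) (fun k =>
          !((PySem.List.pyRange 2 ((Nat.sqrt (delta + 1).toNat : Int) + 1) 1).any
              (fun i => decide (i ∣ k ∧ i * i ≤ k)))) := by
  unfold pvBFirst
  have hmain := foldl_seg_char (lo := 2) (hi := 2 + delta)
    (fun d i => (PySem.List.pyRange (i * i) ((delta + 1) + 1) i).foldl (fun d mul => d.insert mul false) d)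
    (fun i k => decide (i ∣ k ∧ i * i ≤ k))
    (PySem.List.pyRange 2 ((Nat.sqrt (delta + 1).toNat : Int) + 1) 1) (fun _ => true) _ ?_
    (base_items 2 (2 + delta))
  · rw [hmain]
    exact segItems_congr (fun k _ _ => by simp)
  · intro i hi g' d'' hd''
    rw [PySem.List.mem_pyRange_one] at hi
    have hi2 : 2 ≤ i := hi.1
    have hi0 : (0:Int) < i := by omega
    have hmem : ∀ m ∈ PySem.List.pyRange (i * i) ((delta + 1) + 1) i, 2 ≤ m ∧ m < 2 + delta := by
      intro m hm
      rw [PySem.List.mem_pyRange_iff_of_pos hi0] at hm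
      constructor
      · nlinarith [hm.1]
      · omega
    rw [foldl_insert_false_items _ g' d'' hmem hd'']
    refine segItems_congr (fun k _hk1 hk2 => ?_)
    have hcd : ((PySem.List.pyRange (i * i) ((delta + 1) + 1) i).contains k)
        = decide (k ∈ PySem.List.pyRange (i * i) ((delta + 1) + 1) i) := by
      simp [List.contains_eq_mem]
    rw [hcd]
    have hiff : (k ∈ PySem.List.pyRange (i * i) ((delta + 1) + 1) i) ↔ (i ∣ k ∧ i * i ≤ k) := by
      rw [PySem.List.mem_pyRange_iff_of_pos hi0]
      have := crossA_iff (p := i) (k := k) (b := delta + 1) (by omega : k ≤ delta + 1)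
      constructor
      · rintro ⟨h1, h2, h3⟩
        exact this.mp ⟨h1, by omega, h3⟩
      · intro h
        rcases this.mpr h with ⟨h1, h2, h3⟩
        exact ⟨h1, by omega, h3⟩
    rw [decide_eq_decide.mpr hiff]

-- i*i ≤ L implies i ≤ isqrt(L), with the Nat.sqrt cast bookkeeping
theorem le_sqrt_int {i L : Int} (hi : 0 ≤ i) (hL : 0 ≤ L) (h : i * i ≤ L) :
    i ≤ (Nat.sqrt L.toNat : Int) := by
  have h1 : (i.toNat : Int) = i := Int.toNat_of_nonneg hi
  have h2 : (L.toNat : Int) = L := Int.toNat_of_nonneg hL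
  have h3 : i.toNat * i.toNat ≤ L.toNat := by
    have : ((i.toNat * i.toNat : Nat) : Int) ≤ ((L.toNat : Nat) : Int) := by
      push_cast
      rw [h1, h2]
      exact h
    exact_mod_cast this
  have h4 : i.toNat ≤ Nat.sqrt L.toNat := Nat.le_sqrt.mpr h3
  omega

-- the two first-sieve crossing predicates agree on the keys
theorem first_bridge (delta k : Int) (hd2 : 2 ≤ delta) (_hk1 : 2 ≤ k) (hk2 : k < 2 + delta) :
    ((PySem.List.pyRange 2 (2 + delta) 1).any (fun i => decide (i ∣ k ∧ i * i ≤ k)))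
      = ((PySem.List.pyRange 2 ((Nat.sqrt (delta + 1).toNat : Int) + 1) 1).any
          (fun i => decide (i ∣ k ∧ i * i ≤ k))) := by
  rw [Bool.eq_iff_iff, List.any_eq_true, List.any_eq_true]
  constructor
  · rintro ⟨i, hi, hpred⟩
    rw [PySem.List.mem_pyRange_one] at hi
    rw [decide_eq_true_eq] at hpred
    refine ⟨i, ?_, by rw [decide_eq_true_eq]; exact hpred⟩
    rw [PySem.List.mem_pyRange_one]
    have := le_sqrt_int (by omega : (0:Int) ≤ i) (by omega : (0:Int) ≤ delta + 1)
      (by omega : i * i ≤ delta + 1)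
    exact ⟨hi.1, by omega⟩
  · rintro ⟨i, hi, hpred⟩
    rw [PySem.List.mem_pyRange_one] at hi
    rw [decide_eq_true_eq] at hpred
    refine ⟨i, ?_, by rw [decide_eq_true_eq]; exact hpred⟩
    rw [PySem.List.mem_pyRange_one]
    have hii : i ≤ i * i := by nlinarith [hi.1]
    exact ⟨hi.1, by omega⟩

-- the two first sieves have identical items
theorem first_eq (delta : Int) (hd2 : 2 ≤ delta) :
    (pvAFirst delta).items = (pvBFirst delta).items := by
  rw [afirst_items delta hd2, bfirst_items delta hd2]
  exact segItems_congr (fun k hk1 hk2 => by rw [first_bridge delta k hd2 hk1 hk2])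

-- A's nested scan over all previous sieves = B's scan over the collected primes
theorem seg_bridge (sieves : List (PySem.Dict Int Bool)) (primes : List Int)
    (hp : primes = sieves.flatMap pvTrueKeys) (k : Int) :
    (sieves.any (fun ps => ps.items.any (fun q => q.2 && decide (q.1 ∣ k ∧ q.1 * q.1 ≤ k))))
      = (primes.any (fun p => decide (p ∣ k ∧ p * p ≤ k))) := by
  rw [hp, List.any_flatMap]
  refine PySem.List.any_congr_mem (fun ps _ => ?_)
  unfold pvTrueKeys
  rw [List.any_map, List.any_filter]
  rfl

theorem filter_map_pair (f : Int → Bool) :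
    ∀ (L : List Int), (((L.map (fun k => (k, f k))).filter (·.2)).map (·.1)) = L.filter f := by
  intro L
  induction L with
  | nil => rfl
  | cons a t ih =>
    by_cases hfa : f a = true
    · simp [hfa, ih]
    · simp [hfa, ih]

theorem trueKeys_filter {lo hi : Int} {f : Int → Bool} {d : PySem.Dict Int Bool}
    (hd : d.items = segItems lo hi f) :
    pvTrueKeys d = (PySem.List.pyRange lo hi 1).filter f := by
  unfold pvTrueKeys
  rw [hd]
  unfold segItems
  exact filter_map_pair f _

theorem trueKeys_pairwise {lo hi : Int} {f : Int → Bool} {d : PySem.Dict Int Bool}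
    (hd : d.items = segItems lo hi f) : (pvTrueKeys d).Pairwise (· ≤ ·) := by
  rw [trueKeys_filter hd]
  exact List.Pairwise.sublist List.filter_sublist
    ((PySem.List.pairwise_lt_pyRange_one lo hi).imp le_of_lt)

-- in an ascending prime list, everything the break skips really has p*p ≥ hi
theorem mem_takeWhile_of_sorted {hi : Int} :
    ∀ (l : List Int), l.Pairwise (· ≤ ·) → (∀ p ∈ l, 2 ≤ p) →
      ∀ p ∈ l, p * p < hi → p ∈ l.takeWhile (fun p => decide (p * p < hi)) := by
  intro l
  induction l with
  | nil => intro _ _ p hp; cases hp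
  | cons a t ih =>
    intro hsort h2 p hp hpred
    rcases List.mem_cons.mp hp with rfl | hpt
    · rw [List.takeWhile_cons, if_pos (by simpa using hpred)]
      exact List.mem_cons_self
    · have ha : a ≤ p := (List.pairwise_cons.mp hsort).1 p hpt
      have ha2 : 2 ≤ a := h2 a List.mem_cons_self
      have haa : a * a < hi := by
        have : a * a ≤ p * p := mul_le_mul ha ha (by omega) (by omega)
        omega
      rw [List.takeWhile_cons, if_pos (by simpa using haa)]
      exact List.mem_cons_of_mem a
        (ih (List.pairwise_cons.mp hsort).2 (fun q hq => h2 q (List.mem_cons_of_mem a hq)) p hpt hpred)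

-- the break loses no crossing relevant to a key k < hi
theorem any_takeWhile_eq {hi k : Int} (primes : List Int)
    (hsort : primes.Pairwise (· ≤ ·)) (hp2 : ∀ p ∈ primes, 2 ≤ p) (hk : k < hi) :
    ((primes.takeWhile (fun p => decide (p * p < hi))).any (fun p => decide (p ∣ k ∧ p * p ≤ k)))
      = (primes.any (fun p => decide (p ∣ k ∧ p * p ≤ k))) := by
  rw [Bool.eq_iff_iff, List.any_eq_true, List.any_eq_true]
  constructor
  · rintro ⟨p, hpm, hpred⟩
    exact ⟨p, (List.takeWhile_sublist _).subset hpm, hpred⟩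
  · rintro ⟨p, hpm, hpred⟩
    rw [decide_eq_true_eq] at hpred
    refine ⟨p, mem_takeWhile_of_sorted primes hsort hp2 p hpm (by omega), ?_⟩
    rw [decide_eq_true_eq]
    exact hpred

-- the two per-iteration segments have identical items
theorem seg_eq (delta lo : Int) (_hd2 : 2 ≤ delta) (_hlo : 2 ≤ lo)
    (sieves : List (PySem.Dict Int Bool)) (primes : List Int)
    (hp : primes = sieves.flatMap pvTrueKeys)
    (hp2 : ∀ p ∈ primes, 2 ≤ p)
    (hsort : primes.Pairwise (· ≤ ·)) :
    (pvASeg delta lo sieves).items = (pvBSeg lo (lo + delta) primes).items := by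
  have hkeys : ∀ ps ∈ sieves, ∀ q ∈ ps.items, q.2 = true → 2 ≤ q.1 := by
    intro ps hps q hq h2
    apply hp2
    rw [hp]
    rw [List.mem_flatMap]
    refine ⟨ps, hps, ?_⟩
    unfold pvTrueKeys
    rw [List.mem_map]
    exact ⟨q, List.mem_filter.mpr ⟨hq, h2⟩, rfl⟩
  rw [aseg_items delta lo sieves hkeys, bseg_items lo (lo + delta) primes hp2]
  refine segItems_congr (fun k _ hk2 => ?_)
  rw [any_takeWhile_eq primes hsort hp2 hk2, seg_bridge sieves primes hp k]

-- the main loop invariant: A's sieves list and B's (lo, primes) state generate equal output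
theorem loop_eq (delta : Int) (hd2 : 2 ≤ delta) :
    ∀ (n fuel : Nat), n < fuel →
    ∀ (num yielded lo : Int) (sieves : List (PySem.Dict Int Bool)) (primes : List Int)
      (lastd : PySem.Dict Int Bool) (F : Int → Bool),
      (num - yielded).toNat = n →
      2 ≤ lo →
      sieves.getLast? = some lastd →
      lastd.items = segItems lo (lo + delta) F →
      primes = sieves.flatMap pvTrueKeys →
      (∀ p ∈ primes, 2 ≤ p) →
      (∀ p ∈ primes, p < lo + delta) →
      primes.Pairwise (· ≤ ·) →
      pvALoop delta fuel yielded num sieves = pvBLoop delta n lo primes := by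
  intro n
  induction n with
  | zero =>
    intro fuel hfuel num yielded lo sieves primes lastd F hn _ _ _ _ _ _ _
    match fuel, hfuel with
    | f + 1, _ =>
      rw [pvALoop, if_neg (by omega), pvBLoop]
  | succ m ih =>
    intro fuel hfuel num yielded lo sieves primes lastd F hn hlo hlast hlastitems hp hp2 hub hsort
    match fuel, hfuel with
    | f + 1, hfuel =>
      rw [pvALoop, if_pos (by omega), pvBLoop]
      dsimp only
      have hget : (PySem.List.pyGet? sieves (-1)).getD PySem.Dict.empty = lastd := by
        rw [PySem.List.pyGet?_neg_one, hlast]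
        rfl
      have hph : pvMaxKeys ((PySem.List.pyGet? sieves (-1)).getD PySem.Dict.empty) + 1 = lo + delta := by
        rw [hget, maxKeys_seg hlastitems (by omega)]
        ring
      rw [hph]
      set lo' := lo + delta with hlo'
      have hlo'2 : 2 ≤ lo' := by omega
      have hseg := seg_eq delta lo' hd2 hlo'2 sieves primes hp hp2 hsort
      set ns := pvASeg delta lo' sieves with hns
      set s := pvBSeg lo' (lo' + delta) primes with hs
      have hnschar := aseg_items delta lo' sieves (by
        intro ps hps q hq h2
        apply hp2
        rw [hp, List.mem_flatMap]
        refine ⟨ps, hps, ?_⟩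
        unfold pvTrueKeys
        rw [List.mem_map]
        exact ⟨q, List.mem_filter.mpr ⟨hq, h2⟩, rfl⟩)
      refine congrArg₂ List.cons hseg ?_
      have htk : pvTrueKeys s = pvTrueKeys ns := trueKeys_of_items_eq hseg.symm
      rw [htk]
      refine ih f (by omega) num (yielded + 1) lo' (sieves ++ [ns]) (primes ++ pvTrueKeys ns) ns _
        (by omega) (by omega) List.getLast?_concat hnschar ?_ ?_ ?_ ?_
      · rw [hp, List.flatMap_append]
        simp
      · intro p hpm
        rcases List.mem_append.mp hpm with h | h
        · exact hp2 p h
        · have := (trueKeys_bound hnschar p h).1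
          omega
      · intro p hpm
        rcases List.mem_append.mp hpm with h | h
        · have := hub p h
          omega
        · have := (trueKeys_bound hnschar p h).2
          omega
      · rw [List.pairwise_append]
        refine ⟨hsort, trueKeys_pairwise hnschar, ?_⟩
        intro p hpo q hqn
        have h1 := hub p hpo
        have h2 := (trueKeys_bound hnschar q hqn).1
        omega

-- Pre_: num_sieves ≥ 0 (math.sqrt raises ValueError on negative input)
theorem main_eq (num : Int) (h0 : 0 ≤ num) :
    segmented_sieves num = segmented_sieves_alt num := by
  unfold segmented_sieves segmented_sieves_alt
  set delta : Int := (Nat.sqrt num.toNat : Int) + 2 with hdelta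
  have hd2 : 2 ≤ delta := by omega
  have hfirst := first_eq delta hd2
  have hafc := afirst_items delta hd2
  dsimp only
  congr 1
  refine loop_eq delta hd2 num.toNat (num.toNat + 1) (by omega) num 0 2 [pvAFirst delta]
    (pvTrueKeys (pvBFirst delta)) (pvAFirst delta) _ (by omega) (by omega) rfl hafc ?_ ?_ ?_ ?_
  · simp [trueKeys_of_items_eq hfirst]
  · intro p hpm
    rw [trueKeys_of_items_eq hfirst.symm] at hpm
    exact (trueKeys_bound hafc p hpm).1
  · intro p hpm
    rw [trueKeys_of_items_eq hfirst.symm] at hpm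
    exact (trueKeys_bound hafc p hpm).2
  · rw [trueKeys_of_items_eq hfirst.symm]
    exact trueKeys_pairwise hafc

-- ===== VERDICT (by name: the statement is the Claim_ definition above) =====
theorem segmented_sieves_spec : Claim_equal_segmented_sieves := by
  intro num_sieves _ hpre
  exact main_eq num_sieves hpre
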